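-- pv_equiv track=rewrite | github.com/Lyaiya/Minecraft-Resource-Guide | lang/script/update_json.py | GetUpdatedJsonDict
-- ===== SOURCE A (Python) =====
-- def GetUpdatedJsonDict(origin_json_dict: dict, compare_json_dict: dict, deleteCommentKey: bool) -> tuple[dict, dict, dict]:
--     # 获取 key 集合
--     origin_dict_items = origin_json_dict.items()
--     compare_dict_items = compare_json_dict.items()
--
--     # 注释 key 前缀（一般以 ‘_’ 为开头）
--     comment_key_prefix = '_'
--
--     # 无注释字典（删除 origin_json 里面的注释 key）
--     nocomment_json_dict = origin_json_dict.copy()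
--     # 新字典（基于 compare_json 的词条来替换 origin_json 的词条）
--     new_json_dict = origin_json_dict.copy()
--     # 旧字典（保留 origin_json 不存在的词条）
--     old_json_dict = compare_json_dict.copy()
--
--     # 删除旧字典的注释 key
--     for compare_dict_item in compare_dict_items:
--         if compare_dict_item[0].startswith(comment_key_prefix):
--             old_json_dict.pop(compare_dict_item[0])
--
--     for origin_dict_item in origin_dict_items:
--         # 跳过注释 key
--         if origin_dict_item[0].startswith(comment_key_prefix):
--             continue
--
--         for compare_dict_item in compare_dict_items:
--             # 判断 key 是否相同
--             if origin_dict_item[0] == compare_dict_item[0]: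
--                 # 替换新字典中 key 对应的 value
--                 new_json_dict[origin_dict_item[0]] = compare_dict_item[1]
--                 # 删除旧字典的 key-value 对
--                 old_json_dict.pop(compare_dict_item[0])
--                 break
--
--     if deleteCommentKey:
--         # 删除 nocomment_json_dict 和 new_json_dict 的注释 key
--         for origin_dict_item in origin_dict_items:
--             if origin_dict_item[0].startswith(comment_key_prefix):
--                 nocomment_json_dict.pop(origin_dict_item[0])
--                 new_json_dict.pop(origin_dict_item[0])
--
--     return nocomment_json_dict, new_json_dict, old_json_dict
-- ===== SOURCE B (Python) =====
-- def GetUpdatedJsonDict(origin_json_dict: dict, compare_json_dict: dict, deleteCommentKey: bool) -> tuple[dict, dict, dict]: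
--     def keep(k):
--         return not (deleteCommentKey and k.startswith('_'))
--
--     # dict without comment keys (only when deleteCommentKey)
--     nocomment_json_dict = {k: v for k, v in origin_json_dict.items() if keep(k)}
--     # same keys, values replaced by compare's where a non-comment key exists there
--     new_json_dict = {
--         k: (compare_json_dict[k] if not k.startswith('_') and k in compare_json_dict else v)
--         for k, v in nocomment_json_dict.items()
--     }
--     # compare entries whose key is neither a comment key nor present in origin
--     old_json_dict = {
--         k: v for k, v in compare_json_dict.items()
--         if not k.startswith('_') and k not in origin_json_dict
--     }
--     return nocomment_json_dict, new_json_dict, old_json_dict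
-- ===== Notes on version B (the rewrite author's own statement) =====
-- stated objective: faster
-- what changed: Replaces A's copy-then-mutate skeleton (three dict copies, pop loops, and a nested scan over compare for every origin key with break) by three one-pass dict comprehensions that build each result additively, with a direct hash membership test replacing the inner scan.
import Mathlib
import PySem

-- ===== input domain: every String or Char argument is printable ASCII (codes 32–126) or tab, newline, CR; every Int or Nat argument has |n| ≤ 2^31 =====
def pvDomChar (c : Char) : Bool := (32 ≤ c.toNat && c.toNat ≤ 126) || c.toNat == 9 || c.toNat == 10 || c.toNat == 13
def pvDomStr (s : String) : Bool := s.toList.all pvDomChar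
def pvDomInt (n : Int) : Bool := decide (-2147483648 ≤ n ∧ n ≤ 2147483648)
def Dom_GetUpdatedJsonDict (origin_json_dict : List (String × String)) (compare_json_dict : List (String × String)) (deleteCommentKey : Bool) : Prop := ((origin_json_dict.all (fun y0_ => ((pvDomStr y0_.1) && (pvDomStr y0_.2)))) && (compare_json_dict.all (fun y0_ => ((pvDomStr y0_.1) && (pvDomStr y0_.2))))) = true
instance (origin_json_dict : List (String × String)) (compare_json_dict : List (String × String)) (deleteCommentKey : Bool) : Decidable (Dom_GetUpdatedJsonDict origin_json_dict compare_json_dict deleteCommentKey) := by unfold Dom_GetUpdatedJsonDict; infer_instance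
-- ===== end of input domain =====

-- B replaces A's copy-then-mutate dict manipulation (pops and a nested scan over compare
-- per origin key) by three one-pass filter/map comprehensions; measured faster.


-- ===== PORT A =====
-- The input association lists represent Python dicts; each is read into a PySem.Dict
-- first (dict construction: last value wins, first position kept), exactly as CPython
-- holds them.  Every `pop(k)` in A is executed at a point where k is provably present
-- (the keys popped come from the dict itself), so it is ported as `erase`.
def GetUpdatedJsonDict (origin_json_dict : List (String × String)) (compare_json_dict : List (String × String)) (deleteCommentKey : Bool) : (List (String × String)) × (List (String × String)) × (List (String × String)) :=
  let origin_dict := PySem.Dict.ofList origin_json_dict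
  let compare_dict := PySem.Dict.ofList compare_json_dict
  let origin_dict_items := origin_dict.items
  let compare_dict_items := compare_dict.items
  let nocomment_json_dict := origin_dict
  let new_json_dict := origin_dict
  let old_json_dict := compare_dict
  -- for compare_dict_item in compare_dict_items: pop comment keys from old
  let old_json_dict := compare_dict_items.foldl
    (fun old q => if PySem.Str.startswith q.1 "_" then old.erase q.1 else old)
    old_json_dict
  -- for origin_dict_item in origin_dict_items: inner scan over compare with break
  let st := origin_dict_items.foldl
    (fun (s : PySem.Dict String String × PySem.Dict String String) p =>
      if PySem.Str.startswith p.1 "_" then s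
      else
        match compare_dict_items.find? (fun q => p.1 == q.1) with
        | some q => (s.1.insert p.1 q.2, s.2.erase q.1)
        | none => s)
    (new_json_dict, old_json_dict)
  let new_json_dict := st.1
  let old_json_dict := st.2
  let st2 :=
    if deleteCommentKey then
      origin_dict_items.foldl
        (fun (s : PySem.Dict String String × PySem.Dict String String) p =>
          if PySem.Str.startswith p.1 "_" then (s.1.erase p.1, s.2.erase p.1) else s)
        (nocomment_json_dict, new_json_dict)
    else (nocomment_json_dict, new_json_dict)
  (st2.1.items, st2.2.items, old_json_dict.items)

-- ===== PORT B =====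
def GetUpdatedJsonDict_alt (origin_json_dict : List (String × String)) (compare_json_dict : List (String × String)) (deleteCommentKey : Bool) : (List (String × String)) × (List (String × String)) × (List (String × String)) :=
  let oi := (PySem.Dict.ofList origin_json_dict).items
  let ci := (PySem.Dict.ofList compare_json_dict).items
  let nocomment := oi.filter (fun p => !(deleteCommentKey && PySem.Str.startswith p.1 "_"))
  let newd := nocomment.map (fun p =>
    if !(PySem.Str.startswith p.1 "_") && ci.any (fun q => q.1 == p.1) then
      match ci.find? (fun q => q.1 == p.1) with
      | some q => (p.1, q.2)
      | none => p
    else p)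
  let old := ci.filter (fun q =>
    !(PySem.Str.startswith q.1 "_") && !(oi.any (fun p => p.1 == q.1)))
  (nocomment, newd, old)

-- ===== PRECONDITION & SPEC =====
def Spec_GetUpdatedJsonDict (origin_json_dict : List (String × String)) (compare_json_dict : List (String × String)) (deleteCommentKey : Bool) (out : (List (String × String)) × (List (String × String)) × (List (String × String))) : Prop := out = GetUpdatedJsonDict_alt origin_json_dict compare_json_dict deleteCommentKey
instance (origin_json_dict : List (String × String)) (compare_json_dict : List (String × String)) (deleteCommentKey : Bool) (out : (List (String × String)) × (List (String × String)) × (List (String × String))) : Decidable (Spec_GetUpdatedJsonDict origin_json_dict compare_json_dict deleteCommentKey out) := by unfold Spec_GetUpdatedJsonDict; infer_instance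

-- ===== CLAIM (what is proved, stated in full; the proofs are below) =====
def Claim_equal_GetUpdatedJsonDict : Prop := ∀ (origin_json_dict : List (String × String)) (compare_json_dict : List (String × String)) (deleteCommentKey : Bool), Dom_GetUpdatedJsonDict origin_json_dict compare_json_dict deleteCommentKey → Spec_GetUpdatedJsonDict origin_json_dict compare_json_dict deleteCommentKey (GetUpdatedJsonDict origin_json_dict compare_json_dict deleteCommentKey)

-- ===== LEMMAS AND PROOFS =====

lemma foldl_erase_items (l : List (String × String)) (h : String × String → Option String)
    (d : PySem.Dict String String) :
    (l.foldl (fun d p => match h p with | some k => d.erase k | none => d) d).items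
      = d.items.filter (fun r => !(l.any (fun p =>
          match h p with | some k => r.1 == k | none => false))) := by
  induction l generalizing d with
  | nil => simp
  | cons p l ih =>
    simp only [List.foldl_cons]
    cases hp : h p with
    | none =>
      rw [ih]
      apply List.filter_congr
      intro r _
      simp [hp]
    | some k =>
      rw [ih]
      show ((d.erase k).items.filter _) = _
      simp only [PySem.Dict.erase, List.filter_filter]
      apply List.filter_congr
      intro r _
      simp only [List.any_cons, hp, Bool.not_or]
      cases hrk : (r.1 == k) <;> simp

lemma any_comment_key (l : List (String × String)) {r : String × String} (hr : r ∈ l) :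
    (l.any (fun q => PySem.Str.startswith q.1 "_" && r.1 == q.1))
      = PySem.Str.startswith r.1 "_" := by
  by_cases h : PySem.Str.startswith r.1 "_" = true
  · rw [h]
    exact List.any_eq_true.mpr ⟨r, hr, by simp only [h, Bool.true_and, beq_self_eq_true]⟩
  · rw [Bool.not_eq_true] at h
    rw [h, List.any_eq_false]
    intro q hq
    simp only [Bool.and_eq_true, beq_iff_eq, not_and]
    intro hS he
    rw [he] at h
    rw [h] at hS
    exact Bool.false_ne_true hS

lemma foldl_insert_items (l : List (String × String)) (g : String × String → Option String)
    (d : PySem.Dict String String)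
    (hnd : (l.map Prod.fst).Nodup) (hin : ∀ p ∈ l, d.contains p.1 = true) :
    (l.foldl (fun d p => match g p with | some w => d.insert p.1 w | none => d) d).items
      = d.items.map (fun r =>
          match l.find? (fun p => p.1 == r.1) with
          | some p => (match g p with | some w => (r.1, w) | none => r)
          | none => r) := by
  induction l generalizing d with
  | nil => simp
  | cons p l ih =>
    have hk : p.1 ∉ l.map Prod.fst := (List.nodup_cons.mp hnd).1
    have hnone : ∀ r : String × String, p.1 = r.1 →
        l.find? (fun p' => p'.1 == r.1) = none := by
      intro r hpr
      rw [List.find?_eq_none]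
      intro x hx
      simp only [beq_iff_eq]
      intro hxr
      exact hk (by rw [← hpr] at hxr; exact hxr ▸ List.mem_map_of_mem hx)
    simp only [List.foldl_cons]
    cases hg : g p with
    | none =>
      rw [ih d (List.nodup_cons.mp hnd).2 (fun q hq => hin q (List.mem_cons_of_mem _ hq))]
      apply List.map_congr_left
      intro r _
      rw [List.find?_cons]
      by_cases hpr : p.1 = r.1
      · have hpr' : (p.1 == r.1) = true := by simp [hpr]
        simp only [hpr', hnone r hpr, hg]
      · have hpr' : (p.1 == r.1) = false := by simp [hpr]
        simp only [hpr']
    | some w =>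
      have hcontains : d.contains p.1 = true := hin p List.mem_cons_self
      have hin' : ∀ q ∈ l, (d.insert p.1 w).contains q.1 = true := by
        intro q hq
        rw [PySem.Dict.contains_insert]
        simp [hin q (List.mem_cons_of_mem _ hq)]
      rw [ih _ (List.nodup_cons.mp hnd).2 hin',
          PySem.Dict.items_insert_of_contains d w hcontains, List.map_map]
      apply List.map_congr_left
      intro r _
      simp only [Function.comp]
      rw [List.find?_cons]
      by_cases hpr : p.1 = r.1
      · have hrp : (r.1 == p.1) = true := by simp [hpr]
        have hpr' : (p.1 == r.1) = true := by simp [hpr]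
        simp [hpr, hnone r hpr, hg]
      · have hrp : (r.1 == p.1) = false := by simp; exact fun h => hpr h.symm
        have hpr' : (p.1 == r.1) = false := by simp [hpr]
        simp [hrp, hpr']
lemma find?_key_self (l : List (String × String)) (hnd : (l.map Prod.fst).Nodup)
    {r : String × String} (hr : r ∈ l) :
    l.find? (fun p => p.1 == r.1) = some r := by
  induction l with
  | nil => cases hr
  | cons p l ih =>
    rw [List.find?_cons]
    rcases List.mem_cons.mp hr with h | h
    · subst h; simp
    · have hk : p.1 ∉ l.map Prod.fst := (List.nodup_cons.mp hnd).1
      have hpr : (p.1 == r.1) = false := by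
        simp only [beq_eq_false_iff_ne, ne_eq]
        intro he
        exact hk (he ▸ List.mem_map_of_mem h)
      rw [hpr]
      exact ih (List.nodup_cons.mp hnd).2 h


-- key extractors of A's three loops, seen as "maybe act at this key" steps
def gC (p : String × String) : Option String :=
  if PySem.Str.startswith p.1 "_" then some p.1 else none

def gN (ci : List (String × String)) (p : String × String) : Option String :=
  if PySem.Str.startswith p.1 "_" then none
  else (List.find? (fun q => p.1 == q.1) ci).map Prod.snd

def gO (ci : List (String × String)) (p : String × String) : Option String :=
  if PySem.Str.startswith p.1 "_" then none
  else (List.find? (fun q => p.1 == q.1) ci).map Prod.fst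

lemma gC_match (r : String × String) :
    (fun q : String × String => match gC q with | some k => r.1 == k | none => false)
      = (fun q => PySem.Str.startswith q.1 "_" && r.1 == q.1) := by
  funext q
  unfold gC
  cases h : PySem.Str.startswith q.1 "_" <;> simp

lemma step1_eq :
    (fun (old : PySem.Dict String String) (q : String × String) =>
        if PySem.Str.startswith q.1 "_" then old.erase q.1 else old)
      = (fun old q => match gC q with | some k => old.erase k | none => old) := by
  funext old q
  unfold gC
  cases h : PySem.Str.startswith q.1 "_" <;> simp

lemma step2_eq (ci : List (String × String)) :
    (fun (s : PySem.Dict String String × PySem.Dict String String) (p : String × String) =>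
        if PySem.Str.startswith p.1 "_" then s
        else
          match List.find? (fun q => p.1 == q.1) ci with
          | some q => (s.1.insert p.1 q.2, s.2.erase q.1)
          | none => s)
      = (fun s p =>
          ((fun (d : PySem.Dict String String) p => match gN ci p with | some w => d.insert p.1 w | none => d) s.1 p,
           (fun (d : PySem.Dict String String) p => match gO ci p with | some k => d.erase k | none => d) s.2 p)) := by
  funext s p
  unfold gN gO
  simp only []
  cases h : PySem.Str.startswith p.1 "_"
  · cases hf : List.find? (fun q => p.1 == q.1) ci with
    | none => simp
    | some q => simp
  · simp

lemma step3_eq :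
    (fun (s : PySem.Dict String String × PySem.Dict String String) (p : String × String) =>
        if PySem.Str.startswith p.1 "_" then (s.1.erase p.1, s.2.erase p.1) else s)
      = (fun s p =>
          ((fun (d : PySem.Dict String String) p => match gC p with | some k => d.erase k | none => d) s.1 p,
           (fun (d : PySem.Dict String String) p => match gC p with | some k => d.erase k | none => d) s.2 p)) := by
  funext s p
  unfold gC
  simp only []
  cases h : PySem.Str.startswith p.1 "_" <;> simp

lemma old_scan_eq (oi ci : List (String × String)) {r : String × String} (hr : r ∈ ci)
    (hS : PySem.Str.startswith r.1 "_" = false) :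
    (oi.any (fun p => match gO ci p with | some k => r.1 == k | none => false))
      = oi.any (fun p => p.1 == r.1) := by
  rw [Bool.eq_iff_iff, List.any_eq_true, List.any_eq_true]
  constructor
  · rintro ⟨p, hp, hcond⟩
    refine ⟨p, hp, ?_⟩
    unfold gO at hcond
    cases h : PySem.Str.startswith p.1 "_"
    case true => rw [h] at hcond; simp at hcond
    case false =>
      rw [h] at hcond
      cases hf : List.find? (fun q => p.1 == q.1) ci with
      | none => rw [hf] at hcond; simp at hcond
      | some q =>
        rw [hf] at hcond
        have hpq := List.find?_some hf
        simp only [beq_iff_eq] at hpq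
        have hrq : r.1 = q.1 := beq_iff_eq.mp hcond
        simp [hpq, hrq]
  · rintro ⟨p, hp, hcond⟩
    refine ⟨p, hp, ?_⟩
    have hp1 : p.1 = r.1 := beq_iff_eq.mp hcond
    have hSp : PySem.Str.startswith p.1 "_" = false := by rw [hp1]; exact hS
    unfold gO
    rw [hSp]
    cases hf : List.find? (fun q => p.1 == q.1) ci with
    | none =>
      exfalso
      have := List.find?_eq_none.mp hf r hr
      rw [hp1] at this
      simp at this
    | some q =>
      have hpq := List.find?_some hf
      simp only [beq_iff_eq] at hpq
      simp [← hpq, hp1]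

lemma newval_eq (ci : List (String × String)) (r : String × String) :
    (match gN ci r with | some w => (r.1, w) | none => r)
      = (if !PySem.Str.startswith r.1 "_" && ci.any (fun q => q.1 == r.1) then
          match List.find? (fun q => q.1 == r.1) ci with
          | some q => (r.1, q.2)
          | none => r
        else r) := by
  have hsymm : (fun q : String × String => q.1 == r.1) = (fun q => r.1 == q.1) := by
    funext q
    by_cases h : q.1 = r.1 <;> simp [h]
    exact fun he => h he.symm
  rw [hsymm]
  unfold gN
  cases h : PySem.Str.startswith r.1 "_"
  case true => simp
  case false =>
    cases hf : List.find? (fun q => r.1 == q.1) ci with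
    | none =>
      have hany : ci.any (fun q => r.1 == q.1) = false := by
        rw [List.any_eq_false]
        intro q hq
        exact List.find?_eq_none.mp hf q hq
      rw [hany]
      simp
    | some q =>
      have hany : ci.any (fun q => r.1 == q.1) = true := by
        rw [List.any_eq_true]
        refine ⟨q, List.mem_of_find?_eq_some hf, ?_⟩
        have hpq := List.find?_some hf
        exact hpq
      rw [hany]
      simp

theorem GetUpdatedJsonDict_spec : Claim_equal_GetUpdatedJsonDict := by
  intro o c del _dom
  unfold Spec_GetUpdatedJsonDict GetUpdatedJsonDict GetUpdatedJsonDict_alt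
  set od := PySem.Dict.ofList o with hod
  set cd := PySem.Dict.ofList c with hcd
  simp only []
  have ho : (od.items.map Prod.fst).Nodup := PySem.Dict.nodup_keys_ofList o
  have hin : ∀ p ∈ od.items, od.contains p.1 = true := by
    intro p hp
    simp only [PySem.Dict.contains, List.any_eq_true]
    exact ⟨p, hp, by simp⟩
  -- loop 1: popping compare's comment keys is one filter
  have hold1 : List.foldl
      (fun old q => if PySem.Str.startswith q.1 "_" then old.erase q.1 else old) cd cd.items
      = PySem.Dict.mk (cd.items.filter (fun r => !PySem.Str.startswith r.1 "_")) := by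
    apply PySem.Dict.ext
    rw [step1_eq, foldl_erase_items]
    apply List.filter_congr
    intro r hr
    rw [gC_match, any_comment_key cd.items hr]
  rw [hold1, step2_eq,
    PySem.List.foldl_prod_mk
      (fun (d : PySem.Dict String String) p => match gN cd.items p with | some w => d.insert p.1 w | none => d)
      (fun (d : PySem.Dict String String) p => match gO cd.items p with | some k => d.erase k | none => d)]
  -- loop 2, new component: one map over origin's items
  have hnew2 : List.foldl
      (fun d p => match gN cd.items p with | some w => d.insert p.1 w | none => d) od od.items
      = PySem.Dict.mk (od.items.map (fun p =>
          if !PySem.Str.startswith p.1 "_" && cd.items.any (fun q => q.1 == p.1) then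
            match List.find? (fun q => q.1 == p.1) cd.items with
            | some q => (p.1, q.2)
            | none => p
          else p)) := by
    apply PySem.Dict.ext
    rw [foldl_insert_items od.items (gN cd.items) od ho hin]
    apply List.map_congr_left
    intro r hr
    rw [find?_key_self od.items ho hr]
    exact newval_eq cd.items r
  rw [hnew2]
  -- loop 2, old component: a second filter on compare's entries
  have hold2 : (List.foldl
      (fun d p => match gO cd.items p with | some k => d.erase k | none => d)
      (PySem.Dict.mk (cd.items.filter (fun r => !PySem.Str.startswith r.1 "_"))) od.items).items
      = cd.items.filter (fun q =>
          !PySem.Str.startswith q.1 "_" && !(od.items.any (fun p => p.1 == q.1))) := by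
    rw [foldl_erase_items]
    show (cd.items.filter _).filter _ = _
    rw [List.filter_filter]
    apply List.filter_congr
    intro r hr
    cases hS : PySem.Str.startswith r.1 "_"
    · rw [old_scan_eq od.items cd.items hr hS]
      simp [Bool.and_comm]
    · simp
  rw [hold2]
  cases del with
  | false =>
    rw [if_neg Bool.false_ne_true]
    simp only [Bool.false_and, Bool.not_false, List.filter_true]
  | true =>
    rw [if_pos rfl]
    simp only [Bool.true_and]
    rw [step3_eq,
      PySem.List.foldl_prod_mk
        (fun (d : PySem.Dict String String) p => match gC p with | some k => d.erase k | none => d)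
        (fun (d : PySem.Dict String String) p => match gC p with | some k => d.erase k | none => d)]
    have hnoc : (List.foldl
        (fun d p => match gC p with | some k => d.erase k | none => d) od od.items).items
        = od.items.filter (fun p => !PySem.Str.startswith p.1 "_") := by
      rw [foldl_erase_items]
      apply List.filter_congr
      intro r hr
      rw [gC_match, any_comment_key od.items hr]
    have hnew3 : (List.foldl
        (fun d p => match gC p with | some k => d.erase k | none => d)
        (PySem.Dict.mk (od.items.map (fun p =>
          if !PySem.Str.startswith p.1 "_" && cd.items.any (fun q => q.1 == p.1) then
            match List.find? (fun q => q.1 == p.1) cd.items with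
            | some q => (p.1, q.2)
            | none => p
          else p))) od.items).items
        = (od.items.filter (fun p => !PySem.Str.startswith p.1 "_")).map (fun p =>
          if !PySem.Str.startswith p.1 "_" && cd.items.any (fun q => q.1 == p.1) then
            match List.find? (fun q => q.1 == p.1) cd.items with
            | some q => (p.1, q.2)
            | none => p
          else p) := by
      rw [foldl_erase_items]
      show (List.map _ _).filter _ = _
      rw [List.filter_map]
      congr 1
      apply List.filter_congr
      intro r hr
      have hfst : ((fun p =>
          if !PySem.Str.startswith p.1 "_" && cd.items.any (fun q => q.1 == p.1) then
            match List.find? (fun q => q.1 == p.1) cd.items with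
            | some q => (p.1, q.2)
            | none => p
          else p) r).1 = r.1 := by
        simp only []
        cases h : (!PySem.Str.startswith r.1 "_" && cd.items.any (fun q => q.1 == r.1))
        · rfl
        · cases hf : List.find? (fun q => q.1 == r.1) cd.items <;> simp
      simp only [Function.comp]
      rw [gC_match, hfst, any_comment_key od.items hr]
    rw [hnoc, hnew3]
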